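-- pv_equiv track=rewrite | github.com/sgpk0717/Algorithm_Self_Study | [백준] 소수 구하기(1929).py | get_che
-- ===== SOURCE A (Python) =====
-- def get_che(n):
--     che = [True for _ in range(n + 1)]
--     che[0], che[1] = False, False
--     for i in range(2, len(che)):
--         if che[i]:
--             for j in range(i + i, len(che), i):
--                 che[j] = False
--     return che
-- ===== SOURCE B (Python) =====
-- def get_che(n):
--     def is_prime(i):
--         if i < 2:
--             return False
--         d = 2
--         while d * d <= i:
--             if i % d == 0:
--                 return False
--             d += 1
--         return True
--     return [is_prime(i) for i in range(n + 1)]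
-- ===== Notes on version B (the rewrite author's own statement) =====
-- stated objective: alternative
-- what changed: Replaced the multiple-marking Eratosthenes sieve (nested sweeps over a shared table) with an independent trial-division primality test per index, mapped over range(n+1).
-- crash fix: For n <= 0 A raises IndexError (che[0], che[1] = False, False on a list shorter than 2); B returns [False] for n = 0 and [] for n < 0. — e.g. on get_che(0): A raises IndexError, B returns [false]
import Mathlib
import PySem

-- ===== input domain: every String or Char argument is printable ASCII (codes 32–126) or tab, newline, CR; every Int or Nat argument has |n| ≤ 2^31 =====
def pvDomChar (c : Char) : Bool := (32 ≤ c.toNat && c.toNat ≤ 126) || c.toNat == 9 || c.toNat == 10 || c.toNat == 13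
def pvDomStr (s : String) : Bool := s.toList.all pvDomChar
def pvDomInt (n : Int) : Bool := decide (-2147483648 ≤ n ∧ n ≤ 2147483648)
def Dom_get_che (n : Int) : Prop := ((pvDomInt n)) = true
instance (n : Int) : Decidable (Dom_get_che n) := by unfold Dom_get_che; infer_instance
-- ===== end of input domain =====

-- B replaces the multiple-marking Eratosthenes sieve with an independent trial-division
-- primality test per index (a different algorithm of similar size; not faster).

-- ===== PORT A =====
-- body of the outer for-loop: 'if che[i]: for j in range(i+i, len(che), i): che[j] = False'
def pvMark (che : List Bool) (i : Int) : List Bool :=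
  if PySem.List.pyGetD che i false then
    (PySem.List.pyRange (i + i) (che.length : Int) i).foldl
      (fun c j => PySem.List.pySetD c j false) che
  else che

def get_che (n : Int) : List Bool :=
  let che := (PySem.List.pyRange 0 (n + 1) 1).map (fun _ => true)
  let che := PySem.List.pySetD (PySem.List.pySetD che 0 false) 1 false
  let L : Int := che.length
  (PySem.List.pyRange 2 L 1).foldl pvMark che

-- ===== PORT B =====
-- the 'while d * d <= i' loop of is_prime
def pvTrial (i d : Int) : Bool :=
  if h : d * d ≤ i then
    (if PySem.Int.mod i d = 0 then false else pvTrial i (d + 1))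
  else true
termination_by (i + 2 - d).toNat
decreasing_by
  have hd : 2 * d ≤ i + 1 := by nlinarith [sq_nonneg d, sq_nonneg (d - 1)]
  have hi : 0 ≤ i := le_trans (mul_self_nonneg d) h
  omega

def pvIsPrime (i : Int) : Bool :=
  if i < 2 then false else pvTrial i 2

def get_che_alt (n : Int) : List Bool :=
  (PySem.List.pyRange 0 (n + 1) 1).map pvIsPrime

-- ===== PRECONDITION & SPEC =====
-- Pre_ excludes exactly n ≤ 0, where A raises IndexError on 'che[0], che[1] = False, False'.
def Pre_get_che (n : Int) : Prop := 1 ≤ n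
instance (n : Int) : Decidable (Pre_get_che n) := by unfold Pre_get_che; infer_instance
def pvWitness_get_che : Int := 10

-- For n ≤ 0 A raises IndexError; B returns [False] for n = 0 and [] for n < 0.
def Raises_get_che (n : Int) : Prop := n ≤ 0
instance (n : Int) : Decidable (Raises_get_che n) := by unfold Raises_get_che; infer_instance
def pvRaiseWitness_get_che : Int := 0
def pvRaiseWitnessOut_get_che : List Bool := [false]

def Spec_get_che (n : Int) (out : List Bool) : Prop := out = get_che_alt n
instance (n : Int) (out : List Bool) : Decidable (Spec_get_che n out) := by unfold Spec_get_che; infer_instance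

-- ===== CLAIM (what is proved, stated in full; the proofs are below) =====
def Claim_equal_get_che : Prop := ∀ (n : Int), Dom_get_che n → Pre_get_che n → Spec_get_che n (get_che n)
def Claim_raises_get_che : Prop := (∀ (n : Int), Dom_get_che n → Raises_get_che n → ¬ Pre_get_che n) ∧ (Dom_get_che (pvRaiseWitness_get_che) ∧ Raises_get_che (pvRaiseWitness_get_che) ∧ get_che_alt (pvRaiseWitness_get_che) = pvRaiseWitnessOut_get_che)

-- ===== LEMMAS AND PROOFS =====

theorem getD_set_false (che : List Bool) (k m : Nat) :
    ((che.set k false).getD m false) = if m = k then false else che.getD m false := by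
  simp only [List.getD_eq_getElem?_getD, List.getElem?_set]
  by_cases h : m = k
  · subst h
    by_cases hl : m < che.length
    · simp [hl]
    · simp [hl]
  · rw [if_neg (fun hh => h hh.symm), if_neg h]

theorem foldl_pySetD_length (js : List Int) (che : List Bool) :
    (js.foldl (fun c j => PySem.List.pySetD c j false) che).length = che.length := by
  induction js generalizing che with
  | nil => rfl
  | cons j js ih => simp [List.foldl, ih, PySem.List.length_pySetD]

theorem foldl_pySetD_getD (js : List Int) (che : List Bool) (hjs : ∀ j ∈ js, 0 ≤ j) (m : Nat) :
    ((js.foldl (fun c j => PySem.List.pySetD c j false) che).getD m false)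
      = if (m : Int) ∈ js then false else che.getD m false := by
  induction js generalizing che with
  | nil => simp
  | cons j js ih =>
    have hj : 0 ≤ j := hjs j (by simp)
    rw [List.foldl_cons, ih _ (fun x hx => hjs x (by simp [hx])),
      PySem.List.pySetD_of_nonneg _ _ hj, getD_set_false]
    by_cases h1 : (m : Int) ∈ js
    · simp [h1]
    · by_cases h2 : (m : Int) = j
      · rw [if_pos (by omega : m = j.toNat), if_pos ((List.mem_cons).2 (Or.inl h2))]
        simp [h1]
      · rw [if_neg (by omega : ¬ m = j.toNat), if_neg h1, if_neg (by simp [h1, h2])]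

theorem pvTrial_true_iff (i d : Int) (hd : 2 ≤ d) :
    pvTrial i d = true ↔ ∀ e : Int, d ≤ e → e * e ≤ i → ¬ e ∣ i := by
  revert hd
  refine pvTrial.induct i (fun d => 2 ≤ d → (pvTrial i d = true ↔ ∀ e : Int, d ≤ e → e * e ≤ i → ¬ e ∣ i)) ?_ ?_ ?_ d
  · intro d h hm hd
    rw [pvTrial, dif_pos h, if_pos hm]
    simp only [Bool.false_eq_true, false_iff]
    push Not
    exact ⟨d, le_rfl, h, (PySem.Int.mod_eq_zero_iff_dvd i d).1 hm⟩
  · intro d h hm ih hd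
    rw [pvTrial, dif_pos h, if_neg hm]
    rw [ih (by omega)]
    constructor
    · intro hall e he hee hdvd
      rcases eq_or_lt_of_le he with heq | hlt
      · cases heq
        exact hm ((PySem.Int.mod_eq_zero_iff_dvd i d).2 hdvd)
      · exact hall e (by omega) hee hdvd
    · intro hall e he hee hdvd
      exact hall e (by omega) hee hdvd
  · intro d h hd
    rw [pvTrial, dif_neg h]
    simp only [true_iff]
    intro e he hee _
    have : d * d ≤ e * e := by nlinarith
    omega

theorem no_proper_prime_divisor_iff (m : Nat) (hm : 2 ≤ m) :
    (∀ p : Nat, Nat.Prime p → p ∣ m → p = m) ↔ Nat.Prime m := by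
  constructor
  · intro hall
    by_contra hnp
    obtain ⟨k, hk, hk2, hklt⟩ := Nat.exists_dvd_of_not_prime2 hm hnp
    have hp := Nat.minFac_prime (by omega : k ≠ 1)
    have heq := hall _ hp (dvd_trans (Nat.minFac_dvd k) hk)
    have hle := Nat.minFac_le (by omega : 0 < k)
    omega
  · intro hp p hpp hpd
    exact (Nat.prime_dvd_prime_iff_eq hpp hp).1 hpd

theorem pvIsPrime_eq (m : Nat) : pvIsPrime (m : Int) = decide (Nat.Prime m) := by
  unfold pvIsPrime
  by_cases hm : (m : Int) < 2
  · rw [if_pos hm]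
    symm
    simp only [decide_eq_false_iff_not]
    exact fun hp => by have := hp.two_le; omega
  · rw [if_neg hm]
    have h2 : 2 ≤ m := by omega
    rw [Bool.eq_iff_iff, decide_eq_true_iff]
    have key : pvTrial (m : Int) 2 = true ↔ Nat.Prime m := by
      rw [pvTrial_true_iff _ _ le_rfl]
      constructor
      · intro hall
        by_contra hnp
        have hp := Nat.minFac_prime (by omega : m ≠ 1)
        have hsq := Nat.minFac_sq_le_self (by omega : 0 < m) hnp
        refine hall (m.minFac : Int) (by exact_mod_cast hp.two_le) ?_ ?_
        · nlinarith [hsq]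
        · exact_mod_cast Nat.minFac_dvd m
      · intro hp e he hee hdvd
        have he0 : 0 ≤ e := by omega
        set k := e.toNat with hk
        have hek : (k : Int) = e := by omega
        have hkd : k ∣ m := by
          rw [← Int.natCast_dvd_natCast]
          rw [hek]; exact hdvd
        rcases hp.eq_one_or_self_of_dvd k hkd with h1 | h1
        · omega
        · subst h1
          have hk2 : 2 ≤ e := by omega
          nlinarith [hee, hk2, hek]
    exact key

theorem pvMark_length (che : List Bool) (i : Int) : (pvMark che i).length = che.length := by
  unfold pvMark
  split
  · exact foldl_pySetD_length _ _
  · rfl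

theorem foldl_pvMark_length (js : List Int) (che : List Bool) :
    (js.foldl pvMark che).length = che.length := by
  induction js generalizing che with
  | nil => rfl
  | cons j js ih => rw [List.foldl_cons, ih, pvMark_length]

theorem final_iff (N t m : Nat) (hstop : N ≤ 2 + t) :
    (2 ≤ m ∧ m < N ∧ ∀ p : Nat, Nat.Prime p → p < 2 + t → p ∣ m → p = m)
      ↔ (2 ≤ m ∧ m < N ∧ Nat.Prime m) := by
  constructor
  · rintro ⟨h2, hN', hall⟩
    refine ⟨h2, hN', ?_⟩
    rw [← no_proper_prime_divisor_iff m h2]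
    intro p hp hpd
    exact hall p hp (by have := Nat.le_of_dvd (by omega) hpd; omega) hpd
  · rintro ⟨h2, hN', hp⟩
    exact ⟨h2, hN', fun p hpp _ hpd => (no_proper_prime_divisor_iff m h2).2 hp p hpp hpd⟩

theorem mark_hche (N t : Nat) (che : List Bool) (hlen : che.length = N) (hlt : 2 + t < N)
    (hche : ∀ m : Nat, (che.getD m false = true ↔
      2 ≤ m ∧ m < N ∧ ∀ p : Nat, Nat.Prime p → p < 2 + t → p ∣ m → p = m)) :
    ∀ m : Nat, ((pvMark che ((2 + t : Nat) : Int)).getD m false = true ↔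
      2 ≤ m ∧ m < N ∧ ∀ p : Nat, Nat.Prime p → p < 2 + (t + 1) → p ∣ m → p = m) := by
  intro m
  unfold pvMark
  rw [PySem.List.pyGetD_natCast]
  by_cases hit : che.getD (2 + t) false = true
  · -- 2+t is prime: the inner loop marks its proper multiples
    obtain ⟨hi2, hiN, hall_i⟩ := (hche (2 + t)).1 hit
    have hiprime : Nat.Prime (2 + t) := by
      rw [← no_proper_prime_divisor_iff (2 + t) (by omega)]
      intro p hp hpd
      have hple := Nat.le_of_dvd (by omega) hpd
      rcases lt_or_eq_of_le hple with hplt | hpe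
      · exact hall_i p hp hplt hpd
      · exact hpe
    rw [if_pos hit]
    have hpos : (0 : Int) < ((2 + t : Nat) : Int) := by positivity
    have hjs : ∀ j ∈ PySem.List.pyRange (((2 + t : Nat) : Int) + ((2 + t : Nat) : Int))
        (che.length : Int) ((2 + t : Nat) : Int), 0 ≤ j := by
      intro j hj
      have := (PySem.List.mem_pyRange_iff_of_pos hpos j).1 hj
      omega
    rw [foldl_pySetD_getD _ _ hjs m]
    by_cases hmem : (m : Int) ∈ PySem.List.pyRange (((2 + t : Nat) : Int) + ((2 + t : Nat) : Int))
        (che.length : Int) ((2 + t : Nat) : Int)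
    · -- m is a proper multiple of 2+t below N: now false, and RHS fails at p = 2+t
      rw [if_pos hmem]
      obtain ⟨hlo, hhi, hdv⟩ := (PySem.List.mem_pyRange_iff_of_pos hpos (m : Int)).1 hmem
      have hdvm : ((2 + t : Nat) : Int) ∣ (m : Int) := by
        have h2i : ((2 + t : Nat) : Int) ∣ (((2 + t : Nat) : Int) + ((2 + t : Nat) : Int)) :=
          ⟨2, by ring⟩
        simpa using dvd_add hdv h2i
      have hdvmN : (2 + t) ∣ m := by exact_mod_cast hdvm
      simp only [Bool.false_eq_true, false_iff]
      rintro ⟨h2, hN', hall⟩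
      have := hall (2 + t) hiprime (by omega) hdvmN
      omega
    · rw [if_neg hmem, hche m]
      constructor
      · rintro ⟨h2, hN', hall⟩
        refine ⟨h2, hN', fun p hp hplt hpd => ?_⟩
        rcases (by omega : p < 2 + t ∨ p = 2 + t) with hc | hc
        · exact hall p hp hc hpd
        · -- p = 2+t divides m, m in range, yet m was not marked: m = 2+t
          subst hc
          by_contra hne
          apply hmem
          rw [PySem.List.mem_pyRange_iff_of_pos hpos]
          have hdvI : ((2 + t : Nat) : Int) ∣ (m : Int) := by exact_mod_cast hpd
          obtain ⟨q, hq⟩ := hpd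
          have hq2 : 2 ≤ q := by
            by_contra hq2
            interval_cases q
            · simp at hq; omega
            · simp at hq; omega
          refine ⟨by push_cast; nlinarith, by omega, ?_⟩
          obtain ⟨c, hc⟩ := hdvI
          exact ⟨c - 2, by push_cast at hc ⊢; linarith [hc]⟩
      · rintro ⟨h2, hN', hall⟩
        exact ⟨h2, hN', fun p hp hplt hpd => hall p hp (by omega) hpd⟩
  · -- 2+t is composite: nothing marked, the new prime bound adds nothing
    rw [if_neg hit]
    have hnp : ¬ Nat.Prime (2 + t) := by
      intro hp
      apply hit
      rw [hche (2 + t)]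
      exact ⟨by omega, hlt, fun p hpp hplt hpd =>
        ((Nat.prime_dvd_prime_iff_eq hpp hp).1 hpd)⟩
    rw [hche m]
    constructor
    · rintro ⟨h2, hN', hall⟩
      refine ⟨h2, hN', fun p hp hplt hpd => ?_⟩
      rcases (by omega : p < 2 + t ∨ p = 2 + t) with hc | hc
      · exact hall p hp hc hpd
      · exact absurd (hc ▸ hp) hnp
    · rintro ⟨h2, hN', hall⟩
      exact ⟨h2, hN', fun p hp hplt hpd => hall p hp (by omega) hpd⟩

theorem sieve_fold (N : Nat) (k t : Nat) (hN : N ≤ 2 + t + k) (che : List Bool)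
    (hlen : che.length = N)
    (hche : ∀ m : Nat, (che.getD m false = true ↔
      2 ≤ m ∧ m < N ∧ ∀ p : Nat, Nat.Prime p → p < 2 + t → p ∣ m → p = m)) :
    ∀ m : Nat, (((PySem.List.pyRange ((2 + t : Nat) : Int) ((N : Nat) : Int) 1).foldl pvMark che).getD m false = true
      ↔ 2 ≤ m ∧ m < N ∧ Nat.Prime m) := by
  induction k generalizing t che with
  | zero =>
    intro m
    rw [PySem.List.pyRange_one_eq_nil (by exact_mod_cast (by omega : N ≤ 2 + t))]
    rw [List.foldl_nil, hche m, final_iff N t m (by omega)]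
  | succ k ih =>
    intro m
    by_cases hstop : N ≤ 2 + t
    · rw [PySem.List.pyRange_one_eq_nil (by exact_mod_cast hstop)]
      rw [List.foldl_nil, hche m, final_iff N t m hstop]
    · have hlt : ((2 + t : Nat) : Int) < ((N : Nat) : Int) := by exact_mod_cast (by omega : 2 + t < N)
      rw [PySem.List.pyRange_one_cons hlt, List.foldl_cons]
      have hcast : ((2 + t : Nat) : Int) + 1 = ((2 + (t + 1) : Nat) : Int) := by push_cast; ring
      rw [hcast]
      exact ih (t + 1) (by omega) (pvMark che ((2 + t : Nat) : Int))
        (by rw [pvMark_length, hlen])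
        (mark_hche N t che hlen (by omega) hche) m

theorem main_eq (n : Int) (hn : 1 ≤ n) : get_che n = get_che_alt n := by
  simp only [get_che, get_che_alt]
  have hN2 : 2 ≤ (n + 1).toNat := by omega
  set N : Nat := (n + 1).toNat with hNdef
  have hlen0 : ((PySem.List.pyRange 0 (n + 1) 1).map (fun _ => true)).length = N := by
    rw [PySem.List.pyRange_one]
    simp [hNdef]
  have hrep : (PySem.List.pyRange 0 (n + 1) 1).map (fun _ => true) = List.replicate N true := by
    rw [List.map_const']
    congr 1
    simpa using hlen0
  have hrepD : ∀ m : Nat, (List.replicate N true).getD m false = decide (m < N) := by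
    intro m
    by_cases h : m < N <;>
      simp [List.getD_eq_getElem?_getD, h]
  -- the table after the prologue
  have hche1 : ∀ m : Nat,
      ((PySem.List.pySetD (PySem.List.pySetD (List.replicate N true) 0 false) 1 false).getD m false = true
        ↔ 2 ≤ m ∧ m < N ∧ ∀ p : Nat, Nat.Prime p → p < 2 + 0 → p ∣ m → p = m) := by
    intro m
    rw [PySem.List.pySetD_of_nonneg _ _ (by norm_num), PySem.List.pySetD_of_nonneg _ _ (by norm_num)]
    have h0 : (0 : Int).toNat = 0 := rfl
    have h1 : (1 : Int).toNat = 1 := rfl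
    rw [h0, h1, getD_set_false, getD_set_false, hrepD]
    by_cases hm1 : m = 1
    · simp [hm1]
    · by_cases hm0 : m = 0
      · simp [hm0]
      · simp only [if_neg hm1, if_neg hm0]
        constructor
        · intro h
          refine ⟨by omega, by simpa using h, fun p hp hplt _ => ?_⟩
          have := hp.two_le; omega
        · rintro ⟨_, h, _⟩
          simpa using h
  have hlen1 : (PySem.List.pySetD (PySem.List.pySetD (List.replicate N true) 0 false) 1 false).length = N := by
    rw [PySem.List.length_pySetD, PySem.List.length_pySetD, List.length_replicate]
  rw [hrep, hlen1]
  have hc2 : (2 : Int) = ((2 + 0 : Nat) : Int) := by norm_num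
  rw [hc2]
  have hA := sieve_fold N N 0 (by omega)
    (PySem.List.pySetD (PySem.List.pySetD (List.replicate N true) 0 false) 1 false) hlen1 hche1
  have hAlen : ((PySem.List.pyRange ((2 + 0 : Nat) : Int) ((N : Nat) : Int) 1).foldl pvMark
      (PySem.List.pySetD (PySem.List.pySetD (List.replicate N true) 0 false) 1 false)).length = N := by
    rw [foldl_pvMark_length, hlen1]
  have hBlen : ((PySem.List.pyRange 0 (n + 1) 1).map pvIsPrime).length = N := by
    rw [PySem.List.pyRange_one]
    simp [hNdef]
  apply List.ext_getElem (by rw [hAlen, hBlen])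
  intro m h1 h2
  have hmN : m < N := by rwa [hAlen] at h1
  have hBval : ((PySem.List.pyRange 0 (n + 1) 1).map pvIsPrime)[m] = decide (Nat.Prime m) := by
    have hmlen : m < (PySem.List.pyRange 0 (n + 1) 1).length := by
      rw [PySem.List.pyRange_one]
      simp only [List.length_map, List.length_range]
      omega
    rw [List.getElem_map, PySem.List.getElem_pyRange_one 0 (n + 1) m hmlen]
    rw [show (0 : Int) + (m : Int) = ((m : Nat) : Int) by ring]
    exact pvIsPrime_eq m
  rw [hBval, ← List.getD_eq_getElem _ false h1]
  rw [Bool.eq_iff_iff, hA m, decide_eq_true_iff]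
  constructor
  · rintro ⟨_, _, hp⟩; exact hp
  · intro hp
    exact ⟨hp.two_le, hmN, hp⟩

-- ===== VERDICT (by name: the statement is the Claim_ definition above) =====
theorem get_che_spec : Claim_equal_get_che := by
  unfold Claim_equal_get_che Spec_get_che Pre_get_che
  intro n _ hn
  exact main_eq n hn

theorem get_che_raises : Claim_raises_get_che := by
  unfold Claim_raises_get_che
  exact ⟨fun n _ h => by unfold Raises_get_che at h; unfold Pre_get_che; omega, by decide⟩

-- witness self-check: the raise-witness facts, read back off the theorem above
theorem pvRaiseWitness_ok :
    Raises_get_che pvRaiseWitness_get_che ∧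
      get_che_alt pvRaiseWitness_get_che = pvRaiseWitnessOut_get_che := by
  have h := get_che_raises
  unfold Claim_raises_get_che at h
  exact ⟨h.2.2.1, h.2.2.2⟩
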